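-- pv_equiv track=rewrite | github.com/Mia-estudiante/useful-code-collection | tasks/task2/multi2single.py | location
-- ===== SOURCE A (Python) =====
-- def location(ins_id, ins_array):
--     up_x, down_x, left_y, right_y = -1, -1, -1, -1
--
--     for row_idx, row in enumerate(ins_array):
--         if (up_x==-1) and (ins_id in row): up_x = row_idx
--         if ins_id in row: down_x = row_idx
--         for col_idx, col in enumerate(row):
--             if (left_y==-1) and (ins_id==col): left_y = col_idx
--             if (ins_id==col) and (col_idx<left_y): left_y = col_idx
--             if (ins_id==col) and (right_y<col_idx): right_y = col_idx
--
--     return up_x, down_x, left_y, right_y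
-- ===== SOURCE B (Python) =====
-- def location(ins_id, ins_array):
--     # Four independent directed searches instead of one stateful sweep:
--     # first/last containing row via early-exit scans (top-down / bottom-up),
--     # columns via per-row first/last occurrence (row.index on the row and its reversal).
--     up_x = next((i for i, row in enumerate(ins_array) if ins_id in row), -1)
--     down_x = next((i for i, row in reversed(list(enumerate(ins_array))) if ins_id in row), -1)
--     matched = [row for row in ins_array if ins_id in row]
--     left_y = min(row.index(ins_id) for row in matched) if matched else -1
--     right_y = max(len(row) - 1 - row[::-1].index(ins_id) for row in matched) if matched else -1
--     return up_x, down_x, left_y, right_y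
-- ===== Notes on version B (the rewrite author's own statement) =====
-- stated objective: alternative
-- what changed: A makes one stateful sweep over every cell threading four running-extrema sentinel variables; B performs four independent directed searches: first/last containing row via early-exit scans from the top and from the bottom, and the column extremes by reducing per-row first/last occurrences obtained with row.index on the row and its reversal.
import Mathlib
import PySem

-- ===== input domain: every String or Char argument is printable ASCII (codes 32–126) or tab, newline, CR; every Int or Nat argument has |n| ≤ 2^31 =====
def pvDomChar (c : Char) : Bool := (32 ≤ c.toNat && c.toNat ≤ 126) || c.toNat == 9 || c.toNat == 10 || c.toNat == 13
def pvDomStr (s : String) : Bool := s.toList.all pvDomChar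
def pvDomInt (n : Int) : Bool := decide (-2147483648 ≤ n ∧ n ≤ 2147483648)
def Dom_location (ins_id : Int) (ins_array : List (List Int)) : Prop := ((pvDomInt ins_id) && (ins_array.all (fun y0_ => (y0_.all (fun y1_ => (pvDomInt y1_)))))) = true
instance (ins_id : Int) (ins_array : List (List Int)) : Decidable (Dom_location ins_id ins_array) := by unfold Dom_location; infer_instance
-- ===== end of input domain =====

-- B replaces A's single stateful sweep over every cell by four independent directed
-- searches: first/last containing row by early-exit scans from either end, and the
-- column extremes from per-row first/last occurrences via row.index (objective: alternative).

-- ===== PORT A =====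
-- inner 'for col_idx, col in enumerate(row)' loop, carrying (left_y, right_y)
def locInner (ins_id : Int) : List (Int × Int) → Int → Int → Int × Int
  | [], left_y, right_y => (left_y, right_y)
  | (col_idx, col) :: rest, left_y, right_y =>
      let l1 := if left_y = -1 ∧ ins_id = col then col_idx else left_y
      let l2 := if ins_id = col ∧ col_idx < l1 then col_idx else l1
      let r1 := if ins_id = col ∧ right_y < col_idx then col_idx else right_y
      locInner ins_id rest l2 r1

-- outer 'for row_idx, row in enumerate(ins_array)' loop, carrying all four variables
def locOuter (ins_id : Int) : List (Int × List Int) → Int → Int → Int → Int → Int × Int × Int × Int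
  | [], up_x, down_x, left_y, right_y => (up_x, down_x, left_y, right_y)
  | (row_idx, row) :: rest, up_x, down_x, left_y, right_y =>
      let u := if up_x = -1 ∧ ins_id ∈ row then row_idx else up_x
      let d := if ins_id ∈ row then row_idx else down_x
      let lr := locInner ins_id (PySem.List.enumerate row) left_y right_y
      locOuter ins_id rest u d lr.1 lr.2

def location (ins_id : Int) (ins_array : List (List Int)) : Int × Int × Int × Int :=
  locOuter ins_id (PySem.List.enumerate ins_array) (-1) (-1) (-1) (-1)

-- ===== PORT B =====
-- next((i for i, row in enumerate(...) if ins_id in row), -1): first match or -1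
-- reversed(list(enumerate(...))) is .reverse; row[::-1] is row.reverse (PySem.List.slice?_none_none_neg_one);
-- row.index(ins_id) is PySem.List.index?; the .getD 0 default is unreachable since every
-- row of matched contains ins_id (row.index never raises there).
def location_alt (ins_id : Int) (ins_array : List (List Int)) : Int × Int × Int × Int :=
  let up_x := (((PySem.List.enumerate ins_array).find? (fun p => decide (ins_id ∈ p.2))).map (fun p => p.1)).getD (-1)
  let down_x := (((PySem.List.enumerate ins_array).reverse.find? (fun p => decide (ins_id ∈ p.2))).map (fun p => p.1)).getD (-1)
  let matched := ins_array.filter (fun row => decide (ins_id ∈ row))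
  let left_y : Int := if matched.isEmpty then -1 else
    (PySem.List.min? (matched.map (fun row => (((PySem.List.index? row ins_id).getD 0 : Nat) : Int))) (fun x => x)).getD (-1)
  let right_y : Int := if matched.isEmpty then -1 else
    (PySem.List.max? (matched.map (fun row => (row.length : Int) - 1 - (((PySem.List.index? row.reverse ins_id).getD 0 : Nat) : Int))) (fun x => x)).getD (-1)
  (up_x, down_x, left_y, right_y)

-- ===== PRECONDITION & SPEC =====
def Spec_location (ins_id : Int) (ins_array : List (List Int)) (out : Int × Int × Int × Int) : Prop := out = location_alt ins_id ins_array
instance (ins_id : Int) (ins_array : List (List Int)) (out : Int × Int × Int × Int) : Decidable (Spec_location ins_id ins_array out) := by unfold Spec_location; infer_instance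

-- ===== CLAIM (what is proved, stated in full; the proofs are below) =====
def Claim_equal_location : Prop := ∀ (ins_id : Int) (ins_array : List (List Int)), Dom_location ins_id ins_array → Spec_location ins_id ins_array (location ins_id ins_array)

-- ===== LEMMAS AND PROOFS =====

-- abstract step functions of A's running extrema
def stepL (l c : Int) : Int := if l = -1 then c else if c < l then c else l
def stepR (r c : Int) : Int := if r < c then c else r

-- matched column indices of one enumerated row
def mcols (ins_id : Int) (cs : List (Int × Int)) : List Int :=
  cs.filterMap (fun q => if q.2 = ins_id then some q.1 else none)

-- matched row indices
def mrows (ins_id : Int) (ps : List (Int × List Int)) : List Int :=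
  ps.filterMap (fun p => if ins_id ∈ p.2 then some p.1 else none)

-- all matched column indices, rows concatenated
def mall (ins_id : Int) (ps : List (Int × List Int)) : List Int :=
  ps.flatMap (fun p => mcols ins_id (PySem.List.enumerate p.2))

theorem locInner_eq (ins_id : Int) (cs : List (Int × Int)) (l r : Int) :
    locInner ins_id cs l r = ((mcols ins_id cs).foldl stepL l, (mcols ins_id cs).foldl stepR r) := by
  induction cs generalizing l r with
  | nil => simp [locInner, mcols]
  | cons c rest ih =>
    obtain ⟨ci, col⟩ := c
    by_cases h : col = ins_id
    · have hm : mcols ins_id ((ci, col) :: rest) = ci :: mcols ins_id rest := by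
        simp [mcols, h]
      simp only [locInner]
      rw [ih, hm]
      simp only [List.foldl_cons]
      have e1 : (if ins_id = col ∧ ci < (if l = -1 ∧ ins_id = col then ci else l) then ci
          else (if l = -1 ∧ ins_id = col then ci else l)) = stepL l ci := by
        simp only [stepL]; split_ifs <;> omega
      have e2 : (if ins_id = col ∧ r < ci then ci else r) = stepR r ci := by
        simp only [stepR]; split_ifs <;> omega
      rw [e1, e2]
    · have hm : mcols ins_id ((ci, col) :: rest) = mcols ins_id rest := by
        simp [mcols, h]
      have h' : ¬ ins_id = col := fun e => h e.symm
      simp only [locInner, h', and_false, false_and, if_false]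
      rw [ih, hm]

theorem mcols_nil_of_not_mem (ins_id : Int) (row : List Int) (s : Int) :
    ins_id ∉ row → mcols ins_id (PySem.List.enumerate row s) = [] := by
  induction row generalizing s with
  | nil => intro _; simp [PySem.List.enumerate_nil, mcols]
  | cons x t ih =>
    intro h
    have hx : ¬ (x = ins_id) := fun e => h (e ▸ List.mem_cons_self ..)
    have ht : ins_id ∉ t := fun m => h (List.mem_cons_of_mem _ m)
    rw [PySem.List.enumerate_cons]
    simp only [mcols, List.filterMap_cons, if_neg hx]
    exact ih (s + 1) ht

theorem fst_enumerate_le {α : Type} (xs : List α) (s : Int) :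
    ∀ p ∈ PySem.List.enumerate xs s, s ≤ p.1 := by
  induction xs generalizing s with
  | nil => simp [PySem.List.enumerate_nil]
  | cons x t ih =>
    intro p hp
    simp only [PySem.List.enumerate_cons, List.mem_cons] at hp
    rcases hp with hp | hp
    · simp [hp]
    · have := ih (s + 1) p hp; omega

theorem locOuter_eq (ins_id : Int) (ps : List (Int × List Int)) (up down l r : Int)
    (hps : ∀ p ∈ ps, 0 ≤ p.1) :
    locOuter ins_id ps up down l r =
      ((if up = -1 then (mrows ins_id ps).head?.getD up else up),
       (mrows ins_id ps).getLast?.getD down,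
       (mall ins_id ps).foldl stepL l,
       (mall ins_id ps).foldl stepR r) := by
  induction ps generalizing up down l r with
  | nil => simp [locOuter, mrows, mall]
  | cons p rest ih =>
    obtain ⟨ri, row⟩ := p
    have hri : (0:Int) ≤ ri := hps (ri, row) (List.mem_cons_self ..)
    have hrest : ∀ p ∈ rest, 0 ≤ p.1 := fun p hp => hps p (List.mem_cons_of_mem _ hp)
    have hM : mall ins_id ((ri, row) :: rest)
        = mcols ins_id (PySem.List.enumerate row) ++ mall ins_id rest := by
      simp [mall]
    by_cases h : ins_id ∈ row
    · have hm : mrows ins_id ((ri, row) :: rest) = ri :: mrows ins_id rest := by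
        simp [mrows, h]
      simp only [locOuter, h, and_true, if_pos]
      rw [locInner_eq, ih _ _ _ _ hrest, hm, hM]
      simp only [List.foldl_append]
      refine Prod.ext ?_ (Prod.ext ?_ rfl)
      · by_cases hu : up = -1
        · have hne : ¬ (ri = -1) := by omega
          simp [hu, hne]
        · simp [hu]
      · show (mrows ins_id rest).getLast?.getD ri = (ri :: mrows ins_id rest).getLast?.getD down
        rw [List.getLast?_cons]
        simp
    · have hm : mrows ins_id ((ri, row) :: rest) = mrows ins_id rest := by
        simp [mrows, h]
      have hc : mcols ins_id (PySem.List.enumerate row) = [] :=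
        mcols_nil_of_not_mem ins_id row 0 h
      simp only [locOuter, h, and_false, if_false]
      rw [locInner_eq, ih _ _ _ _ hrest, hm, hM, hc]
      simp

-- ---- B-side lemmas ----

-- find? projected to the index = head? of the matched-row-index list
theorem find?_map_fst_eq (ins_id : Int) (ps : List (Int × List Int)) :
    ((ps.find? (fun p => decide (ins_id ∈ p.2))).map (fun p => p.1)) = (mrows ins_id ps).head? := by
  induction ps with
  | nil => simp [mrows]
  | cons p t ih =>
    by_cases h : ins_id ∈ p.2
    · simp [List.find?, mrows, h]
    · simp only [List.find?, mrows, List.filterMap_cons, if_neg h, ] at *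
      simpa [h] using ih

-- head of the matched columns = first-occurrence index (row.index), shifted by the start
theorem mcols_head? (ins_id : Int) (row : List Int) (s : Int) :
    (mcols ins_id (PySem.List.enumerate row s)).head?
      = Option.map (fun k : Nat => s + (k : Int)) (PySem.List.index? row ins_id) := by
  induction row generalizing s with
  | nil => simp [PySem.List.enumerate_nil, mcols, PySem.List.index?_eq_idxOf?]
  | cons x t ih =>
    by_cases h : x = ins_id
    · subst h
      rw [PySem.List.index?_cons_self]
      simp [PySem.List.enumerate_cons, mcols]
    · have hstep : mcols ins_id (PySem.List.enumerate (x :: t) s)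
          = mcols ins_id (PySem.List.enumerate t (s + 1)) := by
        simp [mcols, PySem.List.enumerate_cons, h]
      rw [hstep, ih (s + 1), PySem.List.index?_cons_of_ne _ h, Option.map_map]
      cases PySem.List.index? t ins_id with
      | none => simp
      | some k =>
        simp only [Option.map_some, Option.some.injEq, Function.comp_apply]
        omega

-- matched columns are strictly increasing
theorem mcols_pairwise (ins_id : Int) (row : List Int) (s : Int) :
    (mcols ins_id (PySem.List.enumerate row s)).Pairwise (· < ·) := by
  unfold mcols
  rw [List.pairwise_filterMap]
  refine (PySem.List.pairwise_lt_enumerate row s).imp ?_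
  intro a b hab x hx y hy
  split_ifs at hx hy
  cases hx; cases hy; exact hab

-- last of the matched columns = length - 1 - first occurrence in the reversed row
theorem mcols_getLast? (ins_id : Int) (row : List Int) :
    (mcols ins_id (PySem.List.enumerate row 0)).getLast?
      = Option.map (fun k : Nat => (row.length : Int) - 1 - (k : Int))
          (PySem.List.index? row.reverse ins_id) := by
  induction row using List.reverseRecOn with
  | nil => simp [PySem.List.enumerate_nil, mcols, PySem.List.index?_eq_idxOf?]
  | append_singleton t x ih =>
    have hsplit : mcols ins_id (PySem.List.enumerate (t ++ [x]) 0)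
        = mcols ins_id (PySem.List.enumerate t 0)
          ++ mcols ins_id (PySem.List.enumerate [x] (0 + (t.length : Int))) := by
      rw [PySem.List.enumerate_append]
      simp [mcols]
    rw [hsplit, List.reverse_append]
    simp only [List.reverse_cons, List.reverse_nil, List.nil_append, List.singleton_append]
    by_cases h : x = ins_id
    · subst h
      have hone : mcols x (PySem.List.enumerate [x] (0 + (t.length : Int)))
          = [(t.length : Int)] := by
        simp [mcols, PySem.List.enumerate_cons, PySem.List.enumerate_nil]
      rw [hone, List.getLast?_concat, PySem.List.index?_cons_self]
      simp [List.length_append]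
    · have hone : mcols ins_id (PySem.List.enumerate [x] (0 + (t.length : Int))) = [] := by
        simp [mcols, PySem.List.enumerate_cons, PySem.List.enumerate_nil, h]
      rw [hone, List.append_nil, PySem.List.index?_cons_of_ne _ h, ih, Option.map_map]
      cases PySem.List.index? t.reverse ins_id with
      | none => simp
      | some k =>
        simp only [Option.map_some, Option.some.injEq, Function.comp_apply, List.length_append,
          List.length_cons, List.length_nil]
        omega

-- fold-min/max absorption lemmas
theorem foldl_min_of_le (t : List Int) (a : Int) (h : ∀ y ∈ t, a ≤ y) :
    t.foldl min a = a := by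
  induction t generalizing a with
  | nil => rfl
  | cons y t ih =>
    have hy := h y (List.mem_cons_self ..)
    have : min a y = a := by omega
    simp only [List.foldl_cons, this]
    exact ih a (fun z hz => h z (List.mem_cons_of_mem _ hz))

theorem foldl_max_of_le (t : List Int) (a : Int) (h : ∀ y ∈ t, y ≤ a) :
    t.foldl max a = a := by
  induction t generalizing a with
  | nil => rfl
  | cons y t ih =>
    have hy := h y (List.mem_cons_self ..)
    have : max a y = a := by omega
    simp only [List.foldl_cons, this]
    exact ih a (fun z hz => h z (List.mem_cons_of_mem _ hz))

theorem foldl_max_eq_of_mem (t : List Int) (a m : Int) (hm : m ∈ t) (h : ∀ y ∈ t, y ≤ m) :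
    t.foldl max a = max a m := by
  induction t generalizing a with
  | nil => cases hm
  | cons y t ih =>
    simp only [List.foldl_cons]
    rcases List.mem_cons.mp hm with hy | hy
    · subst hy
      by_cases ht : m ∈ t
      · rw [ih (max a m) ht (fun z hz => h z (List.mem_cons_of_mem _ hz))]
        omega
      · rw [foldl_max_of_le t (max a m)
            (fun z hz => le_trans (h z (List.mem_cons_of_mem _ hz)) (le_max_right a m))]
    · have hym : y ≤ m := h y (List.mem_cons_self ..)
      rw [ih (max a y) hy (fun z hz => h z (List.mem_cons_of_mem _ hz))]
      omega

-- notation shortcuts for B's per-row values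
def firstIdx (ins_id : Int) (row : List Int) : Int :=
  (((PySem.List.index? row ins_id).getD 0 : Nat) : Int)

def lastIdx (ins_id : Int) (row : List Int) : Int :=
  (row.length : Int) - 1 - (((PySem.List.index? row.reverse ins_id).getD 0 : Nat) : Int)

-- for a matched row, the matched columns are nonempty with head = firstIdx, getLast = lastIdx
theorem pairwise_le_getLast (l : List Int) (m : Int) (hpw : l.Pairwise (· < ·))
    (hlast : l.getLast? = some m) : ∀ y ∈ l, y ≤ m := by
  induction l with
  | nil => cases hlast
  | cons a t ih =>
    intro y hy
    cases t with
    | nil =>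
      simp only [List.mem_singleton] at hy
      simp only [List.getLast?_singleton, Option.some.injEq] at hlast
      omega
    | cons b u =>
      rw [List.getLast?_cons_cons] at hlast
      have hpw' : (b :: u).Pairwise (· < ·) := (List.pairwise_cons.mp hpw).2
      rcases List.mem_cons.mp hy with hy1 | hy2
      · subst hy1
        have hbmem : m ∈ b :: u := List.mem_of_mem_getLast? hlast
        have := (List.pairwise_cons.mp hpw).1 _ hbmem
        omega
      · exact ih hpw' hlast y hy2

-- for a matched row, the matched columns are nonempty with head = firstIdx, getLast = lastIdx
theorem mcols_shape (ins_id : Int) (row : List Int) (h : ins_id ∈ row) :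
    ∃ rest, mcols ins_id (PySem.List.enumerate row 0) = firstIdx ins_id row :: rest
      ∧ (∀ y ∈ rest, firstIdx ins_id row ≤ y)
      ∧ (∀ y ∈ firstIdx ins_id row :: rest, y ≤ lastIdx ins_id row)
      ∧ lastIdx ins_id row ∈ firstIdx ins_id row :: rest := by
  obtain ⟨k, hk⟩ := Option.isSome_iff_exists.mp ((PySem.List.index?_isSome_iff row ins_id).mpr h)
  have hhead : (mcols ins_id (PySem.List.enumerate row 0)).head? = some ((k : Int)) := by
    rw [mcols_head?, hk]; simp
  obtain ⟨hd, rest, hcons⟩ : ∃ hd rest, mcols ins_id (PySem.List.enumerate row 0) = hd :: rest := by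
    cases hmc : mcols ins_id (PySem.List.enumerate row 0) with
    | nil => rw [hmc] at hhead; cases hhead
    | cons a b => exact ⟨a, b, rfl⟩
  have hhd : hd = firstIdx ins_id row := by
    rw [hcons] at hhead
    simp only [List.head?_cons, Option.some.injEq] at hhead
    unfold firstIdx
    rw [hk, hhead]
    rfl
  subst hhd
  have hpw := mcols_pairwise ins_id row 0
  rw [hcons] at hpw
  have hrest : ∀ y ∈ rest, firstIdx ins_id row ≤ y := by
    intro y hy
    exact le_of_lt ((List.pairwise_cons.mp hpw).1 y hy)
  have hmemrev : ins_id ∈ row.reverse := List.mem_reverse.mpr h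
  obtain ⟨j, hj⟩ := Option.isSome_iff_exists.mp ((PySem.List.index?_isSome_iff row.reverse ins_id).mpr hmemrev)
  have hlast : (mcols ins_id (PySem.List.enumerate row 0)).getLast? = some (lastIdx ins_id row) := by
    rw [mcols_getLast?, hj]
    unfold lastIdx
    rw [hj]
    rfl
  rw [hcons] at hlast
  exact ⟨rest, hcons, hrest, pairwise_le_getLast _ _ hpw hlast,
    List.mem_of_mem_getLast? hlast⟩

-- the big concat folds like the per-row extrema lists
theorem foldl_min_mall (ins_id : Int) (rows : List (List Int)) (hrows : ∀ r ∈ rows, ins_id ∈ r) :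
    ∀ acc, (rows.flatMap (fun row => mcols ins_id (PySem.List.enumerate row))).foldl min acc
      = (rows.map (firstIdx ins_id)).foldl min acc := by
  induction rows with
  | nil => intro acc; rfl
  | cons r t ih =>
    intro acc
    obtain ⟨rest, hcons, hrest, _, _⟩ := mcols_shape ins_id r (hrows r (List.mem_cons_self ..))
    simp only [List.flatMap_cons, List.map_cons, List.foldl_append, List.foldl_cons]
    rw [show PySem.List.enumerate r = PySem.List.enumerate r 0 from rfl, hcons]
    simp only [List.foldl_cons]
    rw [foldl_min_of_le rest (min acc (firstIdx ins_id r))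
        (fun y hy => le_trans (min_le_right _ _) (hrest y hy))]
    exact ih (fun z hz => hrows z (List.mem_cons_of_mem _ hz)) _

theorem foldl_max_mall (ins_id : Int) (rows : List (List Int)) (hrows : ∀ r ∈ rows, ins_id ∈ r) :
    ∀ acc, (rows.flatMap (fun row => mcols ins_id (PySem.List.enumerate row))).foldl max acc
      = (rows.map (lastIdx ins_id)).foldl max acc := by
  induction rows with
  | nil => intro acc; rfl
  | cons r t ih =>
    intro acc
    obtain ⟨rest, hcons, _, hle, hmem⟩ := mcols_shape ins_id r (hrows r (List.mem_cons_self ..))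
    simp only [List.flatMap_cons, List.map_cons, List.foldl_append, List.foldl_cons]
    rw [show PySem.List.enumerate r = PySem.List.enumerate r 0 from rfl, hcons]
    rw [foldl_max_eq_of_mem _ acc _ hmem hle]
    exact ih (fun z hz => hrows z (List.mem_cons_of_mem _ hz)) _

-- mall over an enumeration only depends on the rows, and only on the matched ones
theorem mall_enumerate_eq_flatMap (ins_id : Int) (xs : List (List Int)) (s : Int) :
    mall ins_id (PySem.List.enumerate xs s)
      = xs.flatMap (fun row => mcols ins_id (PySem.List.enumerate row)) := by
  induction xs generalizing s with
  | nil => simp [PySem.List.enumerate_nil, mall]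
  | cons x t ih =>
    simp only [PySem.List.enumerate_cons, mall, List.flatMap_cons] at *
    rw [ih (s + 1)]

theorem flatMap_filter_matched (ins_id : Int) (xs : List (List Int)) :
    xs.flatMap (fun row => mcols ins_id (PySem.List.enumerate row))
      = (xs.filter (fun row => decide (ins_id ∈ row))).flatMap
          (fun row => mcols ins_id (PySem.List.enumerate row)) := by
  induction xs with
  | nil => rfl
  | cons r t ih =>
    by_cases h : ins_id ∈ r
    · simp [List.flatMap_cons, h, ih]
    · have hc : mcols ins_id (PySem.List.enumerate r) = [] := mcols_nil_of_not_mem ins_id r 0 h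
      simp [List.flatMap_cons, h, hc, ih]

-- stepL/stepR folds from -1 on nonnegative lists are foldl min/max head-seeded
theorem mall_elem_nonneg (ins_id : Int) (xs : List (List Int)) :
    ∀ c ∈ mall ins_id (PySem.List.enumerate xs), 0 ≤ c := by
  intro c hc
  simp only [mall, List.mem_flatMap] at hc
  obtain ⟨p, _, hcp⟩ := hc
  simp only [mcols, List.mem_filterMap] at hcp
  obtain ⟨q, hq, he⟩ := hcp
  have := fst_enumerate_le p.2 0 q hq
  split_ifs at he with h
  simp only [Option.some.injEq] at he
  omega

theorem foldl_stepL_min (t : List Int) (x : Int) (hx : 0 ≤ x) (ht : ∀ y ∈ t, 0 ≤ y) :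
    t.foldl stepL x = t.foldl min x := by
  induction t generalizing x with
  | nil => rfl
  | cons y t ih =>
    have hy : (0:Int) ≤ y := ht y (List.mem_cons_self ..)
    have h1 : stepL x y = min x y := by
      simp only [stepL]; split_ifs <;> omega
    simp only [List.foldl_cons, h1]
    exact ih (min x y) (le_min hx hy) (fun z hz => ht z (List.mem_cons_of_mem _ hz))

theorem foldl_stepR_max (t : List Int) (x : Int) :
    t.foldl stepR x = t.foldl max x := by
  induction t generalizing x with
  | nil => rfl
  | cons y t ih =>
    have h1 : stepR x y = max x y := by
      simp only [stepR]; split_ifs <;> omega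
    simp only [List.foldl_cons, h1]
    exact ih (max x y)

-- ===== VERDICT (by name: the statement is the Claim_ definition above) =====
theorem location_spec : Claim_equal_location := by
  intro ins_id ins_array _
  unfold Spec_location location location_alt
  rw [locOuter_eq ins_id _ _ _ _ _ (fst_enumerate_le ins_array 0)]
  have hnn := mall_elem_nonneg ins_id ins_array
  have hM := mall_enumerate_eq_flatMap ins_id ins_array 0
  -- components 1 and 2
  have hup : ((((PySem.List.enumerate ins_array).find? (fun p => decide (ins_id ∈ p.2))).map
      (fun p => p.1)).getD (-1)) = (mrows ins_id (PySem.List.enumerate ins_array)).head?.getD (-1) := by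
    rw [find?_map_fst_eq]
  have hdown : ((((PySem.List.enumerate ins_array).reverse.find? (fun p => decide (ins_id ∈ p.2))).map
      (fun p => p.1)).getD (-1)) = (mrows ins_id (PySem.List.enumerate ins_array)).getLast?.getD (-1) := by
    rw [find?_map_fst_eq]
    unfold mrows
    rw [List.filterMap_reverse, List.head?_reverse]
  set matched := ins_array.filter (fun row => decide (ins_id ∈ row)) with hmatched
  have hmrows : ∀ r ∈ matched, ins_id ∈ r := by
    intro r hr
    have := List.of_mem_filter hr
    simpa using this
  have hflat : mall ins_id (PySem.List.enumerate ins_array)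
      = matched.flatMap (fun row => mcols ins_id (PySem.List.enumerate row)) := by
    rw [hM, flatMap_filter_matched]
  -- components 3 and 4
  cases hm : matched with
  | nil =>
    have hmallnil : mall ins_id (PySem.List.enumerate ins_array) = [] := by
      rw [hflat, hm]; rfl
    rw [hmallnil]
    simp [hup, hdown]
  | cons r t =>
    have hmne : matched.isEmpty = false := by rw [hm]; rfl
    obtain ⟨rest, hcons, hrest, hle, hlmem⟩ :=
      mcols_shape ins_id r (hmrows r (by rw [hm]; exact List.mem_cons_self ..))
    have hflat' : mall ins_id (PySem.List.enumerate ins_array)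
        = (firstIdx ins_id r :: rest)
          ++ t.flatMap (fun row => mcols ins_id (PySem.List.enumerate row)) := by
      rw [hflat, hm, List.flatMap_cons]
      rw [show PySem.List.enumerate r = PySem.List.enumerate r 0 from rfl, hcons]
    have htmem : ∀ z ∈ t, ins_id ∈ z := by
      intro z hz; exact hmrows z (by rw [hm]; exact List.mem_cons_of_mem _ hz)
    -- left
    have hleft : (mall ins_id (PySem.List.enumerate ins_array)).foldl stepL (-1)
        = (PySem.List.min? (matched.map (firstIdx ins_id)) (fun x => x)).getD (-1) := by
      have h0 : (0:Int) ≤ firstIdx ins_id r := by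
        unfold firstIdx; exact Int.natCast_nonneg _
      have hnn' : ∀ y ∈ rest ++ t.flatMap (fun row => mcols ins_id (PySem.List.enumerate row)),
          0 ≤ y := by
        intro y hy
        apply hnn
        rw [hflat', List.cons_append]
        exact List.mem_cons_of_mem _ hy
      rw [hflat', List.cons_append, List.foldl_cons]
      have hstep0 : stepL (-1) (firstIdx ins_id r) = firstIdx ins_id r := by
        simp [stepL]
      rw [hstep0, foldl_stepL_min _ _ h0 hnn', List.foldl_append,
          foldl_min_of_le rest _ hrest, foldl_min_mall ins_id t htmem,
          hm, List.map_cons, PySem.List.min?_id_cons]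
      simp
    -- right
    have hright : (mall ins_id (PySem.List.enumerate ins_array)).foldl stepR (-1)
        = (PySem.List.max? (matched.map (lastIdx ins_id)) (fun x => x)).getD (-1) := by
      rw [foldl_stepR_max]
      rw [hflat']
      simp only [List.foldl_append]
      have hstart : (firstIdx ins_id r :: rest).foldl max (-1) = lastIdx ins_id r := by
        rw [foldl_max_eq_of_mem _ _ _ hlmem hle]
        have h0 : (0:Int) ≤ firstIdx ins_id r := by
          unfold firstIdx; exact Int.natCast_nonneg _
        have h2 : firstIdx ins_id r ≤ lastIdx ins_id r := hle _ (List.mem_cons_self ..)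
        exact max_eq_right (by omega)
      rw [hstart]
      rw [foldl_max_mall ins_id t htmem]
      rw [hm, List.map_cons, PySem.List.max?_id_cons]
      simp
    rw [hm] at hleft hright hmne
    rw [hleft, hright]
    simp [hup, hdown, hmne, firstIdx, lastIdx, PySem.List.index?_eq_idxOf?]
    unfold firstIdx lastIdx
    simp [PySem.List.index?_eq_idxOf?]
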